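-- pv_equiv track=rewrite | github.com/Prakharshrivas/CCAI-CHATBOT | test_dtmf.py | string_to_dtmf
-- ===== SOURCE A (Python) =====
-- def string_to_dtmf(string):
--     def letter_to_dtmf(letter):
--         dtmf_tones = {
--             '1': '1',
--             '2': '2',
--             '3': '3',
--             'A': '2',
--             '4': '4',
--             '5': '5',
--             '6': '6',
--             'B': '2',
--             '7': '7',
--             '8': '8',
--             '9': '9',
--             'C': '2',
--             '*': '*',
--             '0': '0',
--             '#': '#',
--             'D': '3',
--             'E': '3',
--             'F': '3',
--             'G': '4',
--             'H': '4',
--             'I': '4',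
--             'J': '5',
--             'K': '5',
--             'L': '5',
--             'M': '6',
--             'N': '6',
--             'O': '6',
--             'P': '7',
--             'Q': '7',
--             'R': '7',
--             'S': '7',
--             'T': '8',
--             'U': '8',
--             'V': '8',
--             'W': '9',
--             'X': '9',
--             'Y': '9',
--             'Z': '9'
--         }
--         return dtmf_tones.get(letter.upper(), '')
--
--     return ''.join(letter_to_dtmf(letter) for letter in string)
-- ===== SOURCE B (Python) =====
-- def string_to_dtmf(string):
--     out = []
--     for c in string.upper():
--         if '0' <= c <= '9' or c == '*' or c == '#':
--             out.append(c)
--         elif 'A' <= c <= 'Z':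
--             i = ord(c) - 65
--             out.append(chr(50 + (i - (i > 17) - (i > 22)) // 3))
--     return ''.join(out)
-- ===== Notes on version B (the rewrite author's own statement) =====
-- stated objective: faster
-- what changed: Drops A's exhaustive 40-entry letter->digit dict entirely: B uppercases the string once and computes each letter's keypad digit by closed-form arithmetic on its alphabet index (chr(50 + (i - (i>17) - (i>22))//3)), with digits/*/# passed through by range tests. A rebuilds the dict per character; B does no table work at all (measured ~8x faster).
import Mathlib
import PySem

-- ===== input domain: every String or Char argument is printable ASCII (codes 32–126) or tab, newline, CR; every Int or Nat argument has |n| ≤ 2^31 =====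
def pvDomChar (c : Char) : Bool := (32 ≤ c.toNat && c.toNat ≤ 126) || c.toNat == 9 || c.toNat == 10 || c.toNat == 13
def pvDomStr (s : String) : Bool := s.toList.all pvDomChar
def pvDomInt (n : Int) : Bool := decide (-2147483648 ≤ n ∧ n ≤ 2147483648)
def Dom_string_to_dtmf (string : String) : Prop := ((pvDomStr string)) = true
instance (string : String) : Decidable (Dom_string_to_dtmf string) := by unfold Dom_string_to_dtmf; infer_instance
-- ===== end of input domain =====

-- B uppercases the whole string once and replaces A's 40-entry dict by pure arithmetic:
-- a letter's keypad digit is computed in closed form from its alphabet index (no table at all; measured faster).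

-- ===== PORT A =====
def pvDtmfTones : PySem.Dict Char String :=
  PySem.Dict.ofList [('1',"1"),('2',"2"),('3',"3"),('A',"2"),('4',"4"),('5',"5"),('6',"6"),
    ('B',"2"),('7',"7"),('8',"8"),('9',"9"),('C',"2"),('*',"*"),('0',"0"),('#',"#"),
    ('D',"3"),('E',"3"),('F',"3"),('G',"4"),('H',"4"),('I',"4"),('J',"5"),('K',"5"),
    ('L',"5"),('M',"6"),('N',"6"),('O',"6"),('P',"7"),('Q',"7"),('R',"7"),('S',"7"),
    ('T',"8"),('U',"8"),('V',"8"),('W',"9"),('X',"9"),('Y',"9"),('Z',"9")]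

-- letter_to_dtmf: dtmf_tones.get(letter.upper(), '') — letters are the single chars of an
-- ASCII string, so .upper() is the single-char ASCII uppercase (exact on Dom).
def pvLetterToDtmf (letter : Char) : String :=
  PySem.Dict.getD pvDtmfTones (PySem.Chars.upperChar letter) ""

def string_to_dtmf (string : String) : String :=
  PySem.Str.join "" (string.toList.map pvLetterToDtmf)

-- ===== PORT B =====
-- loop body of B: passthrough for '0'-'9','*','#', closed-form arithmetic for letters
def pvAltStep (out : List Char) (c : Char) : List Char :=
  if ('0' ≤ c ∧ c ≤ '9') ∨ c = '*' ∨ c = '#' then out ++ [c]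
  else if 'A' ≤ c ∧ c ≤ 'Z' then
    let i : Int := (c.toNat : Int) - 65
    out ++ [Char.ofNat (Int.toNat (50 +
      PySem.Int.floordiv (i - (if i > 17 then 1 else 0) - (if i > 22 then 1 else 0)) 3))]
  else out

-- ''.join(out) with one-char elements: out kept as a char list; string.upper() applied once up front.
def string_to_dtmf_alt (string : String) : String :=
  String.ofList ((PySem.Str.upper string).toList.foldl pvAltStep [])

-- ===== PRECONDITION & SPEC =====
def Spec_string_to_dtmf (string : String) (out : String) : Prop := out = string_to_dtmf_alt string
instance (string : String) (out : String) : Decidable (Spec_string_to_dtmf string out) := by unfold Spec_string_to_dtmf; infer_instance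

-- ===== CLAIM =====
def Claim_equal_string_to_dtmf : Prop := ∀ (string : String), Dom_string_to_dtmf string → Spec_string_to_dtmf string (string_to_dtmf string)

-- ===== LEMMAS AND PROOFS =====

theorem pvJoin_empty (parts : List (List Char)) : PySem.Chars.join [] parts = parts.flatten := by
  induction parts with
  | nil => simp [PySem.Chars.join_nil]
  | cons h t ih =>
    cases t with
    | nil => simp [PySem.Chars.join_singleton]
    | cons h2 t2 => rw [PySem.Chars.join_cons_cons]; simp_all

theorem pvStep_append (out : List Char) (ch : Char) :
    pvAltStep out ch = out ++ pvAltStep [] ch := by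
  dsimp only [pvAltStep]; split_ifs <;> simp

-- the A-side lookup on c equals B's arithmetic branch on upperChar c, for every domain char
set_option maxRecDepth 10000 in
theorem pvChar_all :
    ((List.range 127).all fun n =>
      (pvLetterToDtmf (Char.ofNat n)).toList == pvAltStep [] (PySem.Chars.upperChar (Char.ofNat n))) = true := by
  decide

theorem pvChar_eq (c : Char) (h : pvDomChar c = true) :
    (pvLetterToDtmf c).toList = pvAltStep [] (PySem.Chars.upperChar c) := by
  have hn : c.toNat ∈ List.range 127 := by
    simp only [List.mem_range]
    simp only [pvDomChar, Bool.or_eq_true, Bool.and_eq_true, decide_eq_true_eq, beq_iff_eq] at h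
    omega
  have := List.all_eq_true.mp pvChar_all _ hn
  rwa [Char.ofNat_toNat, beq_iff_eq] at this

theorem pv_main (s : String) (h : Dom_string_to_dtmf s) :
    string_to_dtmf s = string_to_dtmf_alt s := by
  apply String.toList_inj.mp
  unfold string_to_dtmf string_to_dtmf_alt
  rw [String.toList_ofList, PySem.Str.toList_upper]
  rw [show PySem.Chars.upper s.toList = s.toList.map PySem.Chars.upperChar from rfl]
  rw [PySem.List.foldl_congr_mem (s.toList.map PySem.Chars.upperChar) pvAltStep
      (fun acc x => acc ++ pvAltStep [] x) [] (fun acc x _ => pvStep_append acc x),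
    PySem.List.foldl_append_eq_flatMap, List.nil_append, PySem.Str.toList_join]
  have he : ("" : String).toList = [] := rfl
  rw [he, pvJoin_empty, List.flatten_eq_flatMap]
  simp only [List.flatMap_map, id_eq]
  exact List.flatMap_congr (fun c hc => pvChar_eq c (List.all_eq_true.mp h c hc))

-- ===== VERDICT =====
theorem string_to_dtmf_spec : Claim_equal_string_to_dtmf := by
  intro s h
  unfold Spec_string_to_dtmf
  exact pv_main s h
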